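-- pv_equiv track=rewrite | github.com/GutsNet/VLSM | vlsm_table.py | __set_hosts_and_prefix
-- ===== SOURCE A (Python) =====
-- def __set_hosts_and_prefix(subnets: list) -> tuple:
--     subnets.sort(reverse=True)
--     powers_of_two = [2**p for p in range(24)]
--     hosts = []
--     total_hosts = []
--     prefixes = []
--     for sub in subnets:
--         for p, power in enumerate(powers_of_two):
--             if power > sub and (sub - (power-2)) not in (1, 2):
--                 hosts.append(sub)
--                 total_hosts.append(power-2)
--                 prefixes.append(32-p)
--                 break
--     return hosts, total_hosts, prefixes
-- ===== SOURCE B (Python) =====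
-- def __set_hosts_and_prefix(subnets: list) -> tuple:
--     subnets.sort(reverse=True)
--     hosts = []
--     total_hosts = []
--     prefixes = []
--     for sub in subnets:
--         p = max(0, sub + 1).bit_length()
--         if p < 24:
--             hosts.append(sub)
--             total_hosts.append(2**p - 2)
--             prefixes.append(32 - p)
--     return hosts, total_hosts, prefixes
-- ===== Notes on version B (the rewrite author's own statement) =====
-- stated objective: idiomatic
-- what changed: The inner 24-step scan over precomputed powers of two is replaced by a closed-form bit_length computation (p = max(0, sub+1).bit_length(), skipping the subnet when p >= 24), eliminating the nested loop.
import Mathlib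
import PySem

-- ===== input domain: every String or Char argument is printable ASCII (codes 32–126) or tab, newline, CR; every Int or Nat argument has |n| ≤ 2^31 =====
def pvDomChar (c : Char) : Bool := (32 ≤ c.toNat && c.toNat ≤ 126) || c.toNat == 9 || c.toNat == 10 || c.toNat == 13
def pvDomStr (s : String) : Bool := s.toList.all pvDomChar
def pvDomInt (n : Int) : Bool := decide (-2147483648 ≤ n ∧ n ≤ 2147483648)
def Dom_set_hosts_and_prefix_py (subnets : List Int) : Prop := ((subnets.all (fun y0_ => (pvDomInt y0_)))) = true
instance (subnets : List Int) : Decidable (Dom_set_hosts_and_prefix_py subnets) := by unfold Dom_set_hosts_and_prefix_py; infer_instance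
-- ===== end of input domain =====

-- B replaces A's inner 24-step scan over precomputed powers of two with a closed-form
-- bit_length computation (idiomatic; same asymptotics). Both Pythons sort `subnets` in
-- place (same mutation); the theorems below are about the return value.

-- ===== PORT A =====
-- inner `for p, power in enumerate(powers_of_two): … break` loop of A
def pvInnerA (sub : Int) : List (Int × Int) → (List Int × List Int × List Int) → (List Int × List Int × List Int)
  | [], acc => acc
  | (p, power) :: rest, acc =>
    if power > sub ∧ ¬(sub - (power - 2) = 1 ∨ sub - (power - 2) = 2) then
      (acc.1 ++ [sub], acc.2.1 ++ [power - 2], acc.2.2 ++ [32 - p])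
    else pvInnerA sub rest acc

def set_hosts_and_prefix_py (subnets : List Int) : List Int × List Int × List Int :=
  let subnets := PySem.List.sorted subnets (fun x => x) true
  let powers_of_two := (PySem.List.pyRange 0 24 1).map (fun p => (2 : Int) ^ p.toNat)
  subnets.foldl (fun acc sub => pvInnerA sub (PySem.List.enumerate powers_of_two 0) acc) ([], [], [])

-- ===== PORT B =====
def set_hosts_and_prefix_py_alt (subnets : List Int) : List Int × List Int × List Int :=
  let subnets := PySem.List.sorted subnets (fun x => x) true
  subnets.foldl (fun acc sub =>
    let p := PySem.Int.bitLength (max 0 (sub + 1))   -- max(0, sub + 1).bit_length()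
    if p < 24 then (acc.1 ++ [sub], acc.2.1 ++ [(2 : Int) ^ p - 2], acc.2.2 ++ [32 - (p : Int)])
    else acc) ([], [], [])

-- ===== PRECONDITION & SPEC =====
def Spec_set_hosts_and_prefix_py (subnets : List Int) (out : List Int × List Int × List Int) : Prop := out = set_hosts_and_prefix_py_alt subnets
instance (subnets : List Int) (out : List Int × List Int × List Int) : Decidable (Spec_set_hosts_and_prefix_py subnets out) := by unfold Spec_set_hosts_and_prefix_py; infer_instance

-- ===== CLAIM (what is proved, stated in full; the proofs are below) =====
def Claim_equal_set_hosts_and_prefix_py : Prop := ∀ (subnets : List Int), Dom_set_hosts_and_prefix_py subnets → Spec_set_hosts_and_prefix_py subnets (set_hosts_and_prefix_py subnets)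

-- ===== LEMMAS AND PROOFS =====

-- bitLength characterisation
theorem pv_bl_le_iff (n : Int) (q : Nat) : PySem.Int.bitLength n ≤ q ↔ n.natAbs < 2 ^ q := by
  constructor
  · intro h
    exact lt_of_lt_of_le (PySem.Int.lt_two_pow_bitLength n) (Nat.pow_le_pow_right (by norm_num) h)
  · intro h
    by_contra hq
    rw [Nat.not_le] at hq
    have hn : n ≠ 0 := by
      intro h0
      subst h0
      simp [PySem.Int.bitLength_zero] at hq
    have h2 := PySem.Int.two_pow_bitLength_le n hn
    have h3 : 2 ^ q ≤ 2 ^ (PySem.Int.bitLength n - 1) := Nat.pow_le_pow_right (by norm_num) (by omega)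
    omega

-- A's break condition at exponent q holds iff q ≥ bit_length(max 0 (sub+1))
theorem pv_cond_iff (q : Nat) (sub : Int) :
    ((2 : Int) ^ q > sub ∧ ¬(sub - ((2 : Int) ^ q - 2) = 1 ∨ sub - ((2 : Int) ^ q - 2) = 2)) ↔
      PySem.Int.bitLength (max 0 (sub + 1)) ≤ q := by
  rw [pv_bl_le_iff, ← Nat.cast_lt (α := Int),
    Int.natAbs_of_nonneg (le_max_left 0 (sub + 1))]
  push_cast
  have h2 : (0 : Int) < 2 ^ q := by positivity
  generalize (2 : Int) ^ q = P at *
  omega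

-- the (index, power) pairs A's inner loop traverses, exponents k, k+1, …, k+n-1
def pvGen : Nat → Nat → List (Int × Int)
  | _, 0 => []
  | k, n + 1 => ((k : Int), (2 : Int) ^ k) :: pvGen (k + 1) n

-- the one step both programs take when a subnet is kept, exponent p
def pvApp (acc : List Int × List Int × List Int) (sub : Int) (p : Nat) : List Int × List Int × List Int :=
  (acc.1 ++ [sub], acc.2.1 ++ [(2 : Int) ^ p - 2], acc.2.2 ++ [32 - (p : Int)])

theorem pvGen_eq_enum :
    PySem.List.enumerate ((PySem.List.pyRange 0 24 1).map (fun p => (2 : Int) ^ p.toNat)) 0 = pvGen 0 24 := by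
  decide

theorem pvInnerA_gen (n : Nat) : ∀ (k : Nat) (sub : Int) (acc : List Int × List Int × List Int),
    pvInnerA sub (pvGen k n) acc =
      if max k (PySem.Int.bitLength (max 0 (sub + 1))) < k + n then
        pvApp acc sub (max k (PySem.Int.bitLength (max 0 (sub + 1)))) else acc := by
  induction n with
  | zero =>
    intro k sub acc
    rw [if_neg (by omega)]
    rfl
  | succ n ih =>
    intro k sub acc
    show pvInnerA sub (((k : Int), (2 : Int) ^ k) :: pvGen (k + 1) n) acc = _
    simp only [pvInnerA]
    by_cases h : PySem.Int.bitLength (max 0 (sub + 1)) ≤ k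
    · rw [if_pos ((pv_cond_iff k sub).mpr h)]
      rw [if_pos (by omega), show max k (PySem.Int.bitLength (max 0 (sub + 1))) = k from by omega]
      rfl
    · rw [if_neg (fun hc => h ((pv_cond_iff k sub).mp hc))]
      rw [ih (k + 1) sub acc,
        show max (k + 1) (PySem.Int.bitLength (max 0 (sub + 1))) = max k (PySem.Int.bitLength (max 0 (sub + 1))) from by omega,
        show k + 1 + n = k + (n + 1) from by omega]

theorem pvInnerA_closed (sub : Int) (acc : List Int × List Int × List Int) :
    pvInnerA sub (PySem.List.enumerate ((PySem.List.pyRange 0 24 1).map (fun p => (2 : Int) ^ p.toNat)) 0) acc =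
      if PySem.Int.bitLength (max 0 (sub + 1)) < 24 then pvApp acc sub (PySem.Int.bitLength (max 0 (sub + 1))) else acc := by
  rw [pvGen_eq_enum, pvInnerA_gen 24 0 sub acc]
  rw [show max 0 (PySem.Int.bitLength (max 0 (sub + 1))) = PySem.Int.bitLength (max 0 (sub + 1)) from Nat.max_eq_right (Nat.zero_le _)]

theorem pv_foldl_eq (l : List Int) :
    ∀ (acc : List Int × List Int × List Int),
      l.foldl (fun acc sub => pvInnerA sub (PySem.List.enumerate ((PySem.List.pyRange 0 24 1).map (fun p => (2 : Int) ^ p.toNat)) 0) acc) acc =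
      l.foldl (fun acc sub =>
        if PySem.Int.bitLength (max 0 (sub + 1)) < 24 then
          (acc.1 ++ [sub], acc.2.1 ++ [(2 : Int) ^ PySem.Int.bitLength (max 0 (sub + 1)) - 2],
            acc.2.2 ++ [32 - (PySem.Int.bitLength (max 0 (sub + 1)) : Int)])
        else acc) acc := by
  induction l with
  | nil => intro acc; rfl
  | cons x xs ih =>
    intro acc
    simp only [List.foldl_cons]
    rw [pvInnerA_closed x acc]
    exact ih _

-- ===== VERDICT (by name: the statement is the Claim_ definition above) =====
theorem set_hosts_and_prefix_py_spec : Claim_equal_set_hosts_and_prefix_py := by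
  intro subnets _
  unfold Spec_set_hosts_and_prefix_py set_hosts_and_prefix_py set_hosts_and_prefix_py_alt
  dsimp only
  exact (pv_foldl_eq (PySem.List.sorted subnets (fun x => x) true) ([], [], []))
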